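-- pv_equiv track=rewrite | github.com/anvad/AlgosDataStructures | Starters PA3/hash_substring/hash_substring.py | precompute_hashes
-- ===== SOURCE A (Python) =====
-- def get_hash(s, _prime, _multiplier):
--     ans = 0
--     for c in reversed(s):
--         ans = (ans * _multiplier + ord(c)) % _prime
--     return ans
--
-- def precompute_hashes(pattern, text, p, x):
--     lT = len(text)
--     lP = len(pattern)
--     H = [None] * (lT - lP + 1)
--     S = text[(lT - lP):]
--     H[lT - lP] = get_hash(S, p, x)
--     y = 1
--     for i in range(lP):
--         y = (y * x) % p
--     for i in range(lT - lP - 1, -1, -1):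
--         H[i] = (x * H[i+1] + ord(text[i]) - y * ord(text[i + lP])) % p
--     return H
-- ===== SOURCE B (Python) =====
-- def get_hash(s, _prime, _multiplier):
--     ans = 0
--     for c in reversed(s):
--         ans = (ans * _multiplier + ord(c)) % _prime
--     return ans
--
-- def precompute_hashes(pattern, text, p, x):
--     lP = len(pattern)
--     return [get_hash(text[i:i + lP], p, x) for i in range(len(text) - lP + 1)]
-- ===== Notes on version B (the rewrite author's own statement) =====
-- stated objective: simpler
-- what changed: Replaced the backward rolling-hash recurrence (precomputed multiplier power y and in-place right-to-left array fill) by a one-line comprehension that recomputes each window's hash from scratch with get_hash.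
import Mathlib
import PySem

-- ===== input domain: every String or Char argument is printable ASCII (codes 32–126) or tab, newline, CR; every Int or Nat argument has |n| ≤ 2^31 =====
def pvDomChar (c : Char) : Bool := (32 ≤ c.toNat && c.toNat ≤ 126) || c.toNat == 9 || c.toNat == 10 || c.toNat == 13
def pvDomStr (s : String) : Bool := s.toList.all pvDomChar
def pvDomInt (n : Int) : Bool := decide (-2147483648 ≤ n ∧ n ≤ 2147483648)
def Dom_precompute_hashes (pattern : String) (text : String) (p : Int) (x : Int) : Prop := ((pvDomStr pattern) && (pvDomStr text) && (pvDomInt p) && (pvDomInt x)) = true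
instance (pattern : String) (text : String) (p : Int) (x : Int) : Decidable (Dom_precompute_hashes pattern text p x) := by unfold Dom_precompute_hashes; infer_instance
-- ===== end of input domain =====

-- B replaces A's backward rolling-hash fill by direct per-window recomputation (simpler, not faster).
-- ===== PORT A =====
-- shared module helper get_hash (used verbatim by both Pythons)
def pyGetHash (s : List Char) (p x : Int) : Int :=
  s.reverse.foldl (fun ans c => PySem.Int.mod (ans * x + (c.toNat : Int)) p) 0

-- Literal port of A. The reads pyGetD … ' ' / (… none).getD 0 are exact on every executed
-- iteration (indices are in range and H[i+1] is already filled under Pre_).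
def precompute_hashes (pattern : String) (text : String) (p : Int) (x : Int) : List Int :=
  let t := text.toList
  let lT : Int := (t.length : Int)
  let lP : Int := ((pattern.toList.length : Nat) : Int)
  let H : List (Option Int) := List.replicate (lT - lP + 1).toNat none
  let S := PySem.List.slice t (some (lT - lP)) none
  let H := PySem.List.pySetD H (lT - lP) (some (pyGetHash S p x))
  let y := (PySem.List.pyRange 0 lP 1).foldl (fun y _ => PySem.Int.mod (y * x) p) 1
  let H := (PySem.List.pyRange (lT - lP - 1) (-1) (-1)).foldl
      (fun H i => PySem.List.pySetD H i (some (PySem.Int.mod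
        (x * ((PySem.List.pyGetD H (i + 1) none).getD 0)
          + ((PySem.List.pyGetD t i ' ').toNat : Int)
          - y * ((PySem.List.pyGetD t (i + lP) ' ').toNat : Int)) p))) H
  H.map (fun o => o.getD 0)

-- ===== PORT B =====
def precompute_hashes_alt (pattern : String) (text : String) (p : Int) (x : Int) : List Int :=
  let t := text.toList
  let lP : Int := ((pattern.toList.length : Nat) : Int)
  (PySem.List.pyRange 0 ((t.length : Int) - lP + 1) 1).map
    (fun i => pyGetHash (PySem.List.slice t (some i) (some (i + lP))) p x)

-- ===== PRECONDITION & SPEC =====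
-- Pre_ is exactly where A returns: pattern no longer than text (else IndexError on H[lT-lP]),
-- and p ≠ 0 unless the text is empty (else ZeroDivisionError on the first '% p').
def Pre_precompute_hashes (pattern : String) (text : String) (p : Int) (x : Int) : Prop :=
  pattern.toList.length ≤ text.toList.length ∧ (p ≠ 0 ∨ text.toList.length = 0)
instance (pattern : String) (text : String) (p : Int) (x : Int) : Decidable (Pre_precompute_hashes pattern text p x) := by unfold Pre_precompute_hashes; infer_instance

def pvWitness_precompute_hashes : String × String × Int × Int := ("ab", "abcd", 97, 31)

def Spec_precompute_hashes (pattern : String) (text : String) (p : Int) (x : Int) (out : List Int) : Prop := out = precompute_hashes_alt pattern text p x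
instance (pattern : String) (text : String) (p : Int) (x : Int) (out : List Int) : Decidable (Spec_precompute_hashes pattern text p x out) := by unfold Spec_precompute_hashes; infer_instance

-- ===== CLAIM (what is proved, stated in full; the proofs are below) =====
def Claim_equal_precompute_hashes : Prop := ∀ (pattern : String) (text : String) (p : Int) (x : Int), Dom_precompute_hashes pattern text p x → Pre_precompute_hashes pattern text p x → Spec_precompute_hashes pattern text p x (precompute_hashes pattern text p x)

-- ===== LEMMAS AND PROOFS =====

-- Rolling-hash correctness: hshH i = A's H[i] = B's window hash, all equal mod p.
theorem pymod_congr {p a b : Int} (h : a ≡ b [ZMOD p]) : PySem.Int.mod a p = PySem.Int.mod b p := by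
  show Int.fmod a p = Int.fmod b p
  have he : a % p = b % p := h
  rw [Int.fmod_eq_emod, Int.fmod_eq_emod]
  simp only [Int.dvd_iff_emod_eq_zero, he]

theorem pymod_self (a p : Int) : PySem.Int.mod a p ≡ a [ZMOD p] := by
  have := Int.mul_fdiv_add_fmod a p
  show Int.fmod a p ≡ a [ZMOD p]
  rw [Int.modEq_iff_dvd]
  exact ⟨a.fdiv p, by linarith⟩

theorem pymod_zero (p : Int) : PySem.Int.mod 0 p = 0 := by
  show Int.fmod 0 p = 0
  simp

theorem pymod_idem (a p : Int) : PySem.Int.mod (PySem.Int.mod a p) p = PySem.Int.mod a p :=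
  pymod_congr (pymod_self a p)

def polyH (x : Int) (s : List Char) : Int := s.foldr (fun c a => a * x + (c.toNat : Int)) 0
def winH (t : List Char) (P i : Nat) : List Char := (t.drop i).take P
def hshH (t : List Char) (P : Nat) (p x : Int) (i : Nat) : Int := PySem.Int.mod (polyH x (winH t P i)) p

theorem foldl_poly_cong (p x : Int) (l : List Char) : ∀ {a b : Int}, a ≡ b [ZMOD p] →
    l.foldl (fun a c => a * x + (c.toNat : Int)) a ≡ l.foldl (fun a c => a * x + (c.toNat : Int)) b [ZMOD p] := by
  induction l with
  | nil => intro a b h; exact h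
  | cons c l ih => intro a b h; exact ih ((h.mul_right x).add_right _)

theorem foldl_hash_eq_mod (p x : Int) : ∀ (l : List Char) (a : Int), PySem.Int.mod a p = a →
    l.foldl (fun ans c => PySem.Int.mod (ans * x + (c.toNat : Int)) p) a
      = PySem.Int.mod (l.foldl (fun a c => a * x + (c.toNat : Int)) a) p := by
  intro l
  induction l with
  | nil => intro a ha; simpa using ha.symm
  | cons c l ih =>
      intro a ha
      have h1 := ih (PySem.Int.mod (a * x + (c.toNat : Int)) p) (pymod_idem _ p)
      simp only [List.foldl_cons] at h1 ⊢
      rw [h1]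
      exact pymod_congr (foldl_poly_cong p x l (pymod_self _ p))

theorem getHash_eq_mod_poly (s : List Char) (p x : Int) :
    pyGetHash s p x = PySem.Int.mod (polyH x s) p := by
  have h := foldl_hash_eq_mod p x s.reverse 0 (pymod_zero p)
  unfold pyGetHash polyH
  rw [h, List.foldl_reverse]

theorem poly_init (x : Int) : ∀ (w : List Char) (init : Int),
    w.foldr (fun c a => a * x + (c.toNat : Int)) init = polyH x w + init * x ^ w.length := by
  intro w
  induction w with
  | nil => intro init; simp [polyH]
  | cons c w ih => intro init; simp only [List.foldr_cons, ih init, polyH, List.length_cons]; ring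

theorem poly_append (x : Int) (w : List Char) (c : Char) :
    polyH x (w ++ [c]) = polyH x w + (c.toNat : Int) * x ^ w.length := by
  unfold polyH
  rw [List.foldr_append]
  simpa using poly_init x w ((c.toNat : Int))

theorem poly_roll (t : List Char) (P : Nat) (x : Int) (i : Nat) (hi : i + P < t.length) :
    polyH x (winH t P i)
      = x * polyH x (winH t P (i+1)) + ((t.getD i ' ').toNat : Int)
        - x ^ P * ((t.getD (i+P) ' ').toNat : Int) := by
  cases P with
  | zero =>
      simp [winH, polyH]
  | succ Q =>
      have hiT : i < t.length := by omega
      have hQ : Q < (t.drop (i+1)).length := by rw [List.length_drop]; omega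
      have hwin : winH t (Q+1) i = t[i] :: (t.drop (i+1)).take Q := by
        unfold winH
        rw [List.drop_eq_getElem_cons hiT, List.take_succ_cons]
      have hwin' : winH t (Q+1) (i+1) = (t.drop (i+1)).take Q ++ [t[i+1+Q]] := by
        unfold winH
        rw [List.take_add_one, List.getElem?_eq_getElem hQ]
        simp [List.getElem_drop]
      have hlen : ((t.drop (i+1)).take Q).length = Q := by
        rw [List.length_take, List.length_drop]; omega
      have hg1 : t.getD i ' ' = t[i] := List.getD_eq_getElem t ' ' hiT
      have hg2 : t.getD (i+(Q+1)) ' ' = t[i+1+Q] := by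
        have : i+(Q+1) < t.length := hi
        rw [List.getD_eq_getElem t ' ' this]
        congr 1
        omega
      rw [hwin, hwin', hg1, hg2]
      show polyH x (t[i] :: _) = _
      have hcons : polyH x (t[i] :: (t.drop (i+1)).take Q)
          = polyH x ((t.drop (i+1)).take Q) * x + (t[i].toNat : Int) := rfl
      rw [hcons, poly_append, hlen]
      ring

theorem stepval (t : List Char) (P : Nat) (p x y : Int) (hy : y ≡ x ^ P [ZMOD p])
    (i : Nat) (hi : i + P < t.length) :
    PySem.Int.mod (x * hshH t P p x (i+1) + ((t.getD i ' ').toNat : Int)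
        - y * ((t.getD (i+P) ' ').toNat : Int)) p = hshH t P p x i := by
  unfold hshH
  apply pymod_congr
  have h1 : x * PySem.Int.mod (polyH x (winH t P (i+1))) p ≡ x * polyH x (winH t P (i+1)) [ZMOD p] :=
    (pymod_self _ p).mul_left x
  have h2 : y * ((t.getD (i+P) ' ').toNat : Int) ≡ x ^ P * ((t.getD (i+P) ' ').toNat : Int) [ZMOD p] :=
    hy.mul_right _
  calc x * PySem.Int.mod (polyH x (winH t P (i+1))) p + ((t.getD i ' ').toNat : Int)
          - y * ((t.getD (i+P) ' ').toNat : Int)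
      ≡ x * polyH x (winH t P (i+1)) + ((t.getD i ' ').toNat : Int)
          - x ^ P * ((t.getD (i+P) ' ').toNat : Int) [ZMOD p] := (h1.add_right _).sub h2
    _ = polyH x (winH t P i) := (poly_roll t P x i hi).symm

theorem yfold_cong (p x : Int) : ∀ P : Nat,
    (PySem.List.pyRange 0 (P : Int) 1).foldl (fun y _ => PySem.Int.mod (y * x) p) 1 ≡ x ^ P [ZMOD p] := by
  intro P
  induction P with
  | zero => simp
  | succ Q ih =>
      have hc : ((Q+1 : Nat) : Int) = (Q : Int) + 1 := by push_cast; ring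
      rw [hc, PySem.List.pyRange_one_succ_right (by positivity), List.foldl_append]
      simp only [List.foldl_cons, List.foldl_nil]
      calc PySem.Int.mod ((PySem.List.pyRange 0 (Q:Int) 1).foldl (fun y _ => PySem.Int.mod (y * x) p) 1 * x) p
          ≡ (PySem.List.pyRange 0 (Q:Int) 1).foldl (fun y _ => PySem.Int.mod (y * x) p) 1 * x [ZMOD p] := pymod_self _ p
        _ ≡ x ^ Q * x [ZMOD p] := ih.mul_right x
        _ = x ^ (Q+1) := by ring

theorem cons_shift {α : Type} (f : Nat → α) (j m : Nat) :
    f j :: (List.range m).map (fun k => f (j+1+k)) = (List.range (m+1)).map (fun k => f (j+k)) := by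
  rw [List.range_succ_eq_map, List.map_cons, List.map_map]
  congr 1
  apply List.map_congr_left
  intro k _
  show f (j+1+k) = f (j + (k+1))
  congr 1
  omega

theorem loop_fill (t : List Char) (P : Nat) (p x y : Int) (hP : P ≤ t.length)
    (hy : y ≡ x ^ P [ZMOD p]) :
    ∀ j, j ≤ t.length - P →
    (PySem.List.pyRange ((j:Int) - 1) (-1) (-1)).foldl
      (fun H i => PySem.List.pySetD H i (some (PySem.Int.mod
        (x * ((PySem.List.pyGetD H (i + 1) none).getD 0)
          + ((PySem.List.pyGetD t i ' ').toNat : Int)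
          - y * ((PySem.List.pyGetD t (i + (P:Int)) ' ').toNat : Int)) p)))
      (List.replicate j none ++ (List.range (t.length - P + 1 - j)).map (fun k => some (hshH t P p x (j+k))))
    = (List.range (t.length - P + 1)).map (fun k => some (hshH t P p x k)) := by
  intro j
  induction j with
  | zero =>
      intro _
      rw [show ((0:Nat):Int) - 1 = (-1 : Int) by norm_num, PySem.List.pyRange_neg_one_eq_nil le_rfl]
      simp
  | succ j ih =>
      intro hj
      set n := t.length - P with hn
      have hcast : ((j+1 : Nat) : Int) - 1 = (j : Int) := by push_cast; ring
      rw [hcast, PySem.List.pyRange_neg_one_cons (by omega : (-1:Int) < (j:Int))]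
      rw [List.foldl_cons]
      have hstate : (PySem.List.pySetD
          (List.replicate (j+1) none ++ (List.range (n + 1 - (j+1))).map (fun k => some (hshH t P p x (j+1+k))))
          (j:Int) (some (PySem.Int.mod
            (x * ((PySem.List.pyGetD (List.replicate (j+1) none ++ (List.range (n + 1 - (j+1))).map (fun k => some (hshH t P p x (j+1+k)))) ((j:Int) + 1) none).getD 0)
              + ((PySem.List.pyGetD t (j:Int) ' ').toNat : Int)
              - y * ((PySem.List.pyGetD t ((j:Int) + (P:Int)) ' ').toNat : Int)) p)))
          = List.replicate j none ++ (List.range (n + 1 - j)).map (fun k => some (hshH t P p x (j+k))) := by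
        -- the read H[j+1]
        have hread : (PySem.List.pyGetD (List.replicate (j+1) none ++ (List.range (n + 1 - (j+1))).map (fun k => some (hshH t P p x (j+1+k)))) ((j:Int) + 1) none) = some (hshH t P p x (j+1)) := by
          have hc2 : ((j:Int) + 1) = ((j+1 : Nat) : Int) := by push_cast; ring
          rw [hc2, PySem.List.pyGetD_natCast]
          have hlen : (List.replicate (j+1) (none : Option Int)).length = j+1 := List.length_replicate
          have hlt : j + 1 < ((List.replicate (j+1) (none : Option Int)) ++ (List.range (n + 1 - (j+1))).map (fun k => some (hshH t P p x (j+1+k)))).length := by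
            rw [List.length_append, List.length_map, List.length_range, hlen]; omega
          rw [List.getD_eq_getElem _ _ hlt, List.getElem_append_right (by rw [hlen])]
          simp only [hlen, Nat.sub_self, List.getElem_map, List.getElem_range]
        rw [hread]
        -- the written value
        have hval : (PySem.Int.mod (x * ((some (hshH t P p x (j+1))).getD 0)
              + ((PySem.List.pyGetD t (j:Int) ' ').toNat : Int)
              - y * ((PySem.List.pyGetD t ((j:Int) + (P:Int)) ' ').toNat : Int)) p) = hshH t P p x j := by
          have hc3 : ((j:Int) + (P:Int)) = ((j+P : Nat) : Int) := by push_cast; ring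
          rw [hc3, PySem.List.pyGetD_natCast, PySem.List.pyGetD_natCast]
          exact stepval t P p x y hy j (by omega)
        rw [hval]
        -- the write at index j
        rw [PySem.List.pySetD_of_nonneg _ _ (Int.natCast_nonneg j), Int.toNat_natCast]
        rw [List.replicate_succ' (n := j), List.append_assoc, List.set_append]
        simp only [List.length_replicate, lt_irrefl, if_false, Nat.sub_self,
          List.singleton_append, List.set_cons_zero]
        congr 1
        have h1 : n + 1 - j = (n - j) + 1 := by omega
        have h2 : n + 1 - (j+1) = n - j := by omega
        rw [h1, h2]
        exact cons_shift (fun i => some (hshH t P p x i)) j (n - j)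
      rw [hstate]
      exact ih (by omega)
theorem ports_agree_list (t : List Char) (P : Nat) (p x : Int) (hPT : P ≤ t.length) :
    (List.map (fun o => o.getD 0)
      ((PySem.List.pyRange ((t.length : Int) - (P : Int) - 1) (-1) (-1)).foldl
        (fun H i => PySem.List.pySetD H i (some (PySem.Int.mod
          (x * ((PySem.List.pyGetD H (i + 1) none).getD 0)
            + ((PySem.List.pyGetD t i ' ').toNat : Int)
            - ((PySem.List.pyRange 0 (P : Int) 1).foldl (fun y _ => PySem.Int.mod (y * x) p) 1)
              * ((PySem.List.pyGetD t (i + (P : Int)) ' ').toNat : Int)) p)))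
        (PySem.List.pySetD (List.replicate ((t.length : Int) - (P : Int) + 1).toNat none)
          ((t.length : Int) - (P : Int))
          (some (pyGetHash (PySem.List.slice t (some ((t.length : Int) - (P : Int))) none) p x)))))
    = (PySem.List.pyRange 0 ((t.length : Int) - (P : Int) + 1) 1).map
        (fun i => pyGetHash (PySem.List.slice t (some i) (some (i + (P : Int)))) p x) := by
  obtain ⟨n, ht⟩ : ∃ n, t.length = P + n := ⟨t.length - P, by omega⟩
  have e2 : (t.length : Int) - (P : Int) = ((n : Nat) : Int) := by omega
  have e4 : (((n : Nat) : Int) + 1).toNat = n + 1 := by omega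
  simp only [e2, e4]
  have hdrop : PySem.List.slice t (some ((n : Nat) : Int)) none = t.drop n := by
    rw [PySem.List.slice_from _ (Int.natCast_nonneg n), Int.toNat_natCast]
  have hwin_n : t.drop n = winH t P n := by
    unfold winH
    rw [List.take_of_length_le]
    rw [List.length_drop]
    omega
  have hinit : PySem.List.pySetD (List.replicate (n+1) (none : Option Int)) ((n : Nat) : Int)
      (some (pyGetHash (PySem.List.slice t (some ((n : Nat) : Int)) none) p x))
      = List.replicate n none ++ (List.range 1).map (fun k => some (hshH t P p x (n+k))) := by
    rw [hdrop, hwin_n, getHash_eq_mod_poly]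
    rw [PySem.List.pySetD_of_nonneg _ _ (Int.natCast_nonneg n), Int.toNat_natCast]
    rw [List.replicate_succ' (n := n), List.set_append]
    simp only [List.length_replicate, lt_irrefl, if_false, Nat.sub_self, List.set_cons_zero]
    congr 1
  have LF := loop_fill t P p x
      ((PySem.List.pyRange 0 (P : Int) 1).foldl (fun y _ => PySem.Int.mod (y * x) p) 1)
      hPT (yfold_cong p x P) n (by omega)
  simp only [ht, Nat.add_sub_cancel_left] at LF
  rw [hinit, LF]
  -- B side
  rw [PySem.List.pyRange_one, List.map_map, List.map_map]
  have e6 : (((n : Nat) : Int) + 1 - 0).toNat = n + 1 := by omega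
  rw [e6]
  apply List.map_congr_left
  intro k hk
  simp only [Function.comp_apply, Option.getD_some, zero_add]
  rw [PySem.List.slice_natCast_add t k P, getHash_eq_mod_poly]
  rfl

theorem ports_agree (pattern text : String) (p x : Int)
    (hPT : pattern.toList.length ≤ text.toList.length) :
    precompute_hashes pattern text p x = precompute_hashes_alt pattern text p x := by
  simp only [precompute_hashes, precompute_hashes_alt]
  exact ports_agree_list text.toList pattern.toList.length p x hPT

-- ===== VERDICT (by name: the statement is the Claim_ definition above) =====
theorem precompute_hashes_spec : Claim_equal_precompute_hashes := by
  intro pattern text p x _ hpre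
  unfold Spec_precompute_hashes
  exact ports_agree pattern text p x hpre.1
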